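-- pv_equiv track=rewrite | github.com/ictcubeMENA/Training_one | codewars/6kyu/Tick toward/main.py | tick_towardB
-- ===== SOURCE A (Python) =====
-- def tick_towardB(start, target):
--     x1, y1 = target
--     points = [start]
--     while points[-1] != target:
--         x2, y2 = points[-1]
--         a, b = (x2 < x1) - (x2 > x1), (y2 < y1) - (y2 > y1)
--         points.append((x2 + a, y2 + b))
--     return points
-- ===== SOURCE B (Python) =====
-- def tick_towardB(start, target):
--     x0, y0 = start
--     dx, dy = target[0] - x0, target[1] - y0
--     sx = (dx > 0) - (dx < 0)
--     sy = (dy > 0) - (dy < 0)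
--     adx, ady = abs(dx), abs(dy)
--     n = max(adx, ady)
--     return [(x0 + sx * min(i, adx), y0 + sy * min(i, ady)) for i in range(n + 1)]
-- ===== Notes on version B (the rewrite author's own statement) =====
-- stated objective: alternative
-- what changed: Replaced A's while-loop that repeatedly appends the successor of the last point with a closed-form index-driven comprehension: point i is computed absolutely as start + sign*min(i, |delta|) per axis, with n = max(|dx|,|dy|) points after the start.
import Mathlib
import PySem

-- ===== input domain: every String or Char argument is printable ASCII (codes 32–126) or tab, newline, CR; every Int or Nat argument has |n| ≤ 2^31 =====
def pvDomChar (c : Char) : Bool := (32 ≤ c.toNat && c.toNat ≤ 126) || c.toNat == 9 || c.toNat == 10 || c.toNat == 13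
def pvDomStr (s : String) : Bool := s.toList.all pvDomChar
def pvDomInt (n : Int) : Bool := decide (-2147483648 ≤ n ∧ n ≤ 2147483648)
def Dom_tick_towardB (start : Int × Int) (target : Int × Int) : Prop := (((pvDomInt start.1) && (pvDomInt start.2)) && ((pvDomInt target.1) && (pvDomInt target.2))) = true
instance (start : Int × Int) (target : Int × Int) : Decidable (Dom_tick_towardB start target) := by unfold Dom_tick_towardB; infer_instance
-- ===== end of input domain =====

-- B replaces A's append-successor-of-last while loop by a closed-form comprehension
-- computing point i directly from its index (alternative decomposition, same cost).

-- ===== PORT A =====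
-- the loop "while points[-1] != target: append(last + (a,b))" as forward recursion on the
-- current last point; the sign expressions (x2 < x1) - (x2 > x1) are transliterated literally
-- fuel is only a totality guard: |dx| + |dy| steps always reach the target, so the 0 case is never hit
def tickA_go (target : Int × Int) (fuel : Nat) (cur : Int × Int) : List (Int × Int) :=
  match fuel with
  | 0 => [cur]
  | fuel + 1 =>
    if cur = target then [cur]
    else
      let a : Int := (if cur.1 < target.1 then 1 else 0) - (if cur.1 > target.1 then 1 else 0)
      let b : Int := (if cur.2 < target.2 then 1 else 0) - (if cur.2 > target.2 then 1 else 0)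
      cur :: tickA_go target fuel (cur.1 + a, cur.2 + b)

def tick_towardB (start : Int × Int) (target : Int × Int) : List (Int × Int) :=
  tickA_go target ((target.1 - start.1).natAbs + (target.2 - start.2).natAbs) start

-- ===== PORT B =====
def tick_towardB_alt (start : Int × Int) (target : Int × Int) : List (Int × Int) :=
  let dx := target.1 - start.1
  let dy := target.2 - start.2
  let sx : Int := (if dx > 0 then 1 else 0) - (if dx < 0 then 1 else 0)
  let sy : Int := (if dy > 0 then 1 else 0) - (if dy < 0 then 1 else 0)
  let adx := dx.natAbs
  let ady := dy.natAbs
  let n := max adx ady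
  (List.range (n + 1)).map
    (fun (i : Nat) => (start.1 + sx * min (i : Int) (adx : Int), start.2 + sy * min (i : Int) (ady : Int)))

-- ===== PRECONDITION & SPEC =====
def Spec_tick_towardB (start : Int × Int) (target : Int × Int) (out : List (Int × Int)) : Prop := out = tick_towardB_alt start target
instance (start : Int × Int) (target : Int × Int) (out : List (Int × Int)) : Decidable (Spec_tick_towardB start target out) := by unfold Spec_tick_towardB; infer_instance

-- ===== CLAIM (what is proved, stated in full; the proofs are below) =====
def Claim_equal_tick_towardB : Prop := ∀ (start : Int × Int) (target : Int × Int), Dom_tick_towardB start target → Spec_tick_towardB start target (tick_towardB start target)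

-- ===== LEMMAS AND PROOFS =====

-- coordinate formula of B, one axis
def tickCoord (c t : Int) (i : Nat) : Int :=
  c + ((if t - c > 0 then 1 else 0) - (if t - c < 0 then (1:Int) else 0)) * min (i : Int) ((t - c).natAbs : Int)

lemma tickCoord_zero (c t : Int) : tickCoord c t 0 = c := by
  simp [tickCoord]

-- A's one-axis step equals B's sign
lemma step_eq_sign (c t : Int) :
    (if c < t then (1:Int) else 0) - (if c > t then 1 else 0)
      = (if t - c > 0 then (1:Int) else 0) - (if t - c < 0 then 1 else 0) := by
  split_ifs <;> omega

-- stepping once shifts B's closed form by one index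
lemma tickCoord_succ (c t : Int) (i : Nat) :
    tickCoord c t (i + 1)
      = tickCoord (c + ((if t - c > 0 then 1 else 0) - (if t - c < 0 then (1:Int) else 0))) t i := by
  unfold tickCoord
  rcases lt_trichotomy c t with h | h | h
  · have h1 : t - c > 0 := by omega
    simp only [if_pos h1, if_neg (by omega : ¬ t - c < 0)]
    by_cases h2 : t - (c + (1 - 0)) > 0
    · simp only [if_pos h2, if_neg (by omega : ¬ t - (c + (1 - 0)) < 0)]
      have hc : ((t - c).natAbs : Int) = t - c := by omega
      have hc2 : ((t - (c + (1 - 0))).natAbs : Int) = t - c - 1 := by omega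
      rw [hc, hc2]; push_cast; omega
    · simp only [if_neg h2, if_neg (by omega : ¬ t - (c + (1 - 0)) < 0)]
      have hc : ((t - c).natAbs : Int) = 1 := by omega
      rw [hc]; push_cast; omega
  · subst h
    simp
  · have h1 : t - c < 0 := by omega
    simp only [if_neg (by omega : ¬ t - c > 0), if_pos h1]
    by_cases h2 : t - (c + (0 - 1)) < 0
    · simp only [if_neg (by omega : ¬ t - (c + (0 - 1)) > 0), if_pos h2]
      have hc : ((t - c).natAbs : Int) = c - t := by omega
      have hc2 : ((t - (c + (0 - 1))).natAbs : Int) = c - t - 1 := by omega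
      rw [hc, hc2]; push_cast; omega
    · simp only [if_neg (by omega : ¬ t - (c + (0 - 1)) > 0), if_neg h2]
      have hc : ((t - c).natAbs : Int) = 1 := by omega
      rw [hc]; push_cast; omega

-- B written with tickCoord
lemma alt_eq_map (start target : Int × Int) :
    tick_towardB_alt start target
      = (List.range (max (target.1 - start.1).natAbs (target.2 - start.2).natAbs + 1)).map
          (fun i => (tickCoord start.1 target.1 i, tickCoord start.2 target.2 i)) := by
  rfl

-- the Chebyshev distance drops by one after one step
lemma chebyshev_step (cur target : Int × Int) (h : cur ≠ target) :
    max (target.1 - (cur.1 + ((if target.1 - cur.1 > 0 then 1 else 0) - (if target.1 - cur.1 < 0 then (1:Int) else 0)))).natAbs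
        (target.2 - (cur.2 + ((if target.2 - cur.2 > 0 then 1 else 0) - (if target.2 - cur.2 < 0 then (1:Int) else 0)))).natAbs
      + 1
      = max (target.1 - cur.1).natAbs (target.2 - cur.2).natAbs := by
  have h' : cur.1 ≠ target.1 ∨ cur.2 ≠ target.2 := by
    by_contra hc
    simp only [not_or, not_not] at hc
    exact h (Prod.ext hc.1 hc.2)
  split_ifs <;> omega

lemma alt_cons (cur target : Int × Int) (h : cur ≠ target) :
    tick_towardB_alt cur target
      = cur :: tick_towardB_alt
          (cur.1 + ((if target.1 - cur.1 > 0 then 1 else 0) - (if target.1 - cur.1 < 0 then (1:Int) else 0)),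
           cur.2 + ((if target.2 - cur.2 > 0 then 1 else 0) - (if target.2 - cur.2 < 0 then (1:Int) else 0)))
          target := by
  rw [alt_eq_map, alt_eq_map]
  rw [← chebyshev_step cur target h]
  rw [List.range_succ_eq_map]
  simp only [List.map_cons, List.map_map, tickCoord_zero]
  congr 1
  apply List.map_congr_left
  intro i _
  simp only [Function.comp_apply]
  rw [tickCoord_succ, tickCoord_succ]

lemma alt_self (target : Int × Int) : tick_towardB_alt target target = [target] := by
  simp [tick_towardB_alt]

lemma go_eq_alt (target : Int × Int) (fuel : Nat) (cur : Int × Int)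
    (hf : max (target.1 - cur.1).natAbs (target.2 - cur.2).natAbs ≤ fuel) :
    tickA_go target fuel cur = tick_towardB_alt cur target := by
  induction fuel generalizing cur with
  | zero =>
    have h : cur = target := by
      rcases cur with ⟨a, b⟩; rcases target with ⟨c, d⟩
      simp only [Prod.mk.injEq]
      simp only [Nat.max_le] at hf
      constructor <;> omega
    subst h
    rw [alt_self]
    rfl
  | succ fuel ih =>
    show tickA_go target (fuel + 1) cur = _
    unfold tickA_go
    split
    · rename_i h; subst h; exact (alt_self cur).symm
    · rename_i h
      show cur :: tickA_go target fuel
          (cur.1 + ((if cur.1 < target.1 then 1 else 0) - (if cur.1 > target.1 then 1 else 0)),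
           cur.2 + ((if cur.2 < target.2 then 1 else 0) - (if cur.2 > target.2 then 1 else 0))) = _
      rw [step_eq_sign cur.1 target.1, step_eq_sign cur.2 target.2]
      have hstep : max
          (target.1 - (cur.1 + ((if target.1 - cur.1 > 0 then (1:Int) else 0) - (if target.1 - cur.1 < 0 then 1 else 0)))).natAbs
          (target.2 - (cur.2 + ((if target.2 - cur.2 > 0 then (1:Int) else 0) - (if target.2 - cur.2 < 0 then 1 else 0)))).natAbs ≤ fuel := by
        have hc := chebyshev_step cur target h
        omega
      rw [ih _ hstep]
      exact (alt_cons cur target h).symm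

-- ===== VERDICT (by name: the statement is the Claim_ definition above) =====
theorem tick_towardB_spec : Claim_equal_tick_towardB := by
  intro start target _
  unfold Spec_tick_towardB tick_towardB
  exact go_eq_alt target _ start (by omega)
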